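-- pv_equiv track=rewrite | github.com/chainer/chainer | chainermn/datasets/scatter.py | _scatter_index
-- ===== SOURCE A (Python) =====
-- def _scatter_index(n_total_samples, size, force_equal_length):
--     assert size > 0
--     assert n_total_samples >= 0
--     if force_equal_length:
--         n_sub_samples = (n_total_samples + size - 1) // size
--         for i in range(size):
--             b = n_total_samples * i // size
--             e = b + n_sub_samples
--             yield (i, b, e)
--         return
--     else:
--         b = 0
--         stride = (n_total_samples // size) + 1
--         threshold = n_total_samples % size
--         for i in range(threshold):
--             e = b + stride
--             yield (i, b, e)
--             b += stride
--         stride = n_total_samples // size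
--         for i in range(threshold, size):
--             e = b + stride
--             yield (i, b, e)
--             b += stride
--         return
-- ===== SOURCE B (Python) =====
-- def _scatter_index(n_total_samples, size, force_equal_length):
--     assert size > 0
--     assert n_total_samples >= 0
--     if force_equal_length:
--         n_sub_samples = (n_total_samples + size - 1) // size
--         for i in range(size):
--             b = n_total_samples * i // size
--             yield (i, b, b + n_sub_samples)
--     else:
--         q, r = divmod(n_total_samples, size)
--         for i in range(size):
--             yield (i, i * q + min(i, r), (i + 1) * q + min(i + 1, r))
-- ===== Notes on version B (the rewrite author's own statement) =====
-- stated objective: simpler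
-- what changed: The else branch's two sequential accumulator loops (running boundary b, two stride phases) are replaced by one loop over range(size) that computes each boundary directly in closed form: b = i*q + min(i, r) with q, r = divmod(n_total_samples, size).
import Mathlib
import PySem

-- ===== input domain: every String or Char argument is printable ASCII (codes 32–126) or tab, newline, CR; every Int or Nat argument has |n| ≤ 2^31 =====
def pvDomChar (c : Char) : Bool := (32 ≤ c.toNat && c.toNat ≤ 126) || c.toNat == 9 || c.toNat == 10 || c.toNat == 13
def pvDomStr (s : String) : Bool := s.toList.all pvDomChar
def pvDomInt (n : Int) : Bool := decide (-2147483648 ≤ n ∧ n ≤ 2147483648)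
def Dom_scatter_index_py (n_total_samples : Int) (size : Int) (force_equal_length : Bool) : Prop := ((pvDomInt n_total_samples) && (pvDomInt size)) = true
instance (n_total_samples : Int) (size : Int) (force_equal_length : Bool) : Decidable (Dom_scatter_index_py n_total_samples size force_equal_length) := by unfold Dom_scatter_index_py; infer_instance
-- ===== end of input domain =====

-- B replaces A's two sequential accumulator loops with one closed-form loop per worker index; objective: simpler.


-- ===== PORT A =====
-- A's accumulator loop 'for i in range(..): yield (i, b, b+stride); b += stride',
-- as structural recursion on the remaining iteration count; returns (final b, yielded list).
def scatterLoopA (stride : Int) : Nat → Int → Int → (Int × List (Int × Int × Int))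
  | 0, _, b => (b, [])
  | k + 1, i, b =>
      let rest := scatterLoopA stride k (i + 1) (b + stride)
      (rest.1, (i, b, b + stride) :: rest.2)

def scatter_index_py (n_total_samples : Int) (size : Int) (force_equal_length : Bool) : List (Int × Int × Int) :=
  if force_equal_length then
    let n_sub_samples := PySem.Int.floordiv (n_total_samples + size - 1) size
    (PySem.List.pyRange 0 size 1).map (fun i =>
      let b := PySem.Int.floordiv (n_total_samples * i) size
      (i, b, b + n_sub_samples))
  else
    let stride1 := PySem.Int.floordiv n_total_samples size + 1
    let threshold := PySem.Int.mod n_total_samples size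
    let first := scatterLoopA stride1 threshold.toNat 0 0
    let stride2 := PySem.Int.floordiv n_total_samples size
    let second := scatterLoopA stride2 (size - threshold).toNat threshold first.1
    first.2 ++ second.2

-- ===== PORT B =====
def scatter_index_py_alt (n_total_samples : Int) (size : Int) (force_equal_length : Bool) : List (Int × Int × Int) :=
  if force_equal_length then
    let n_sub_samples := PySem.Int.floordiv (n_total_samples + size - 1) size
    (PySem.List.pyRange 0 size 1).map (fun i =>
      let b := PySem.Int.floordiv (n_total_samples * i) size
      (i, b, b + n_sub_samples))
  else
    let q := PySem.Int.floordiv n_total_samples size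
    let r := PySem.Int.mod n_total_samples size
    (PySem.List.pyRange 0 size 1).map (fun i =>
      (i, i * q + min i r, (i + 1) * q + min (i + 1) r))

-- ===== PRECONDITION & SPEC =====
-- Pre_ excludes exactly the inputs on which A's asserts raise AssertionError (size ≤ 0 or negative n_total_samples).
def Pre_scatter_index_py (n_total_samples : Int) (size : Int) (force_equal_length : Bool) : Prop :=
  0 < size ∧ 0 ≤ n_total_samples
instance (n_total_samples : Int) (size : Int) (force_equal_length : Bool) : Decidable (Pre_scatter_index_py n_total_samples size force_equal_length) := by unfold Pre_scatter_index_py; infer_instance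

def pvWitness_scatter_index_py : Int × Int × Bool := (7, 3, false)

def Spec_scatter_index_py (n_total_samples : Int) (size : Int) (force_equal_length : Bool) (out : List (Int × Int × Int)) : Prop := out = scatter_index_py_alt n_total_samples size force_equal_length
instance (n_total_samples : Int) (size : Int) (force_equal_length : Bool) (out : List (Int × Int × Int)) : Decidable (Spec_scatter_index_py n_total_samples size force_equal_length out) := by unfold Spec_scatter_index_py; infer_instance

-- ===== CLAIM (what is proved, stated in full; the proofs are below) =====
def Claim_equal_scatter_index_py : Prop := ∀ (n_total_samples : Int) (size : Int) (force_equal_length : Bool), Dom_scatter_index_py n_total_samples size force_equal_length → Pre_scatter_index_py n_total_samples size force_equal_length → Spec_scatter_index_py n_total_samples size force_equal_length (scatter_index_py n_total_samples size force_equal_length)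

-- ===== LEMMAS AND PROOFS =====

-- Closed form of A's accumulator loop.
theorem scatterLoopA_eq (stride : Int) (k : Nat) (i b : Int) :
    scatterLoopA stride k i b =
      (b + k * stride,
       (List.range k).map (fun (j : Nat) => (i + (j : Int), b + (j : Int) * stride, b + ((j : Int) + 1) * stride))) := by
  induction k generalizing i b with
  | zero => simp [scatterLoopA]
  | succ m ih =>
      simp only [scatterLoopA, ih, List.range_succ_eq_map, List.map_cons, List.map_map,
        Prod.mk.injEq, List.cons.injEq]
      refine ⟨by push_cast; ring, ⟨by push_cast; ring, by push_cast; ring, by push_cast; ring⟩, ?_⟩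
      apply List.map_congr_left
      intro j _
      simp only [Function.comp_apply, Nat.succ_eq_add_one, Prod.mk.injEq, Nat.cast_add,
        Nat.cast_one]
      refine ⟨by ring, by ring, by ring⟩

-- ===== VERDICT (by name: the statement is the Claim_ definition above) =====
theorem scatter_index_py_spec : Claim_equal_scatter_index_py := by
  intro n size f _ hpre
  obtain ⟨hs, hn⟩ := hpre
  unfold Spec_scatter_index_py scatter_index_py scatter_index_py_alt
  cases f with
  | true => simp
  | false =>
      simp only [Bool.false_eq_true, if_false]
      set q := PySem.Int.floordiv n size with hq
      set r := PySem.Int.mod n size with hr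
      have hqe : q = n / size := PySem.Int.floordiv_eq_ediv_of_pos hs
      have hre : r = n % size := PySem.Int.mod_eq_emod_of_pos hs
      have hr0 : 0 ≤ r := by rw [hre]; exact Int.emod_nonneg n (by omega)
      have hrlt : r < size := by rw [hre]; exact Int.emod_lt_of_pos n hs
      have hq0 : 0 ≤ q := by rw [hqe]; exact Int.ediv_nonneg hn (le_of_lt hs)
      rw [scatterLoopA_eq, scatterLoopA_eq]
      simp only [Int.toNat_of_nonneg hr0]
      rw [PySem.List.pyRange_one_append 0 r size hr0 (le_of_lt hrlt), List.map_append,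
          PySem.List.pyRange_one, PySem.List.pyRange_one, List.map_map, List.map_map]
      congr 1
      · have : (r - 0).toNat = r.toNat := by omega
        rw [this]
        apply List.map_congr_left
        intro k hk
        have hk' : (k : Int) < r := by
          simp only [List.mem_range] at hk; omega
        simp only [Function.comp_apply]
        rw [min_eq_left (by omega : (0 : Int) + (k : Int) ≤ r),
            min_eq_left (by omega : (0 : Int) + (k : Int) + 1 ≤ r)]
        refine Prod.ext (by ring) (Prod.ext (by ring) (by ring))
      · apply List.map_congr_left
        intro k _
        have hk0 : (0 : Int) ≤ (k : Int) := by omega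
        simp only [Function.comp_apply]
        rw [min_eq_right (by omega : r ≤ r + (k : Int)),
            min_eq_right (by omega : r ≤ r + (k : Int) + 1)]
        refine Prod.ext (by ring) (Prod.ext (by ring) (by ring))
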